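-- pv_equiv track=rewrite | github.com/dskrill/TemporalIntegration | preprocessing.py | extract_natural_sequences
-- ===== SOURCE A (Python) =====
-- import string
--
-- translator = str.maketrans('', '', string.punctuation)
--
-- excluded_pos = ["NP","NNP","NP-TL","NP$"]
--
-- def extract_natural_sequences(tagged_words,sequence_len):
--     """Extracts natural sequences of specified length from a list of pos-tagged words.
--
--     Additionally preprocesses the words by removing punctuation and lowercasing, and builds
--     up a dictionary of words to their POS tags.
--
--     Args:
--         tagged_words: a list of tuples (word,tag)
--         sequence_len: the length of the sequences to extract
--
--     Returns:
--         a list of natural sequences of the specified length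
--
--     """
--
--     natural_sequences = []
--     word_list = []
--     counter = 0
--
--     for word,tag in tagged_words:
--         w = word.replace("-","").replace("''","").lower().translate(translator)
--         if w.isalpha() and w != '' and not (tag in excluded_pos):
--             word_list.append(w)
--             counter += 1
--             if counter == sequence_len:
--                 natural_sequences.append(word_list[-sequence_len:])
--                 counter = 0
--         else:
--             counter = 0
--
--     return natural_sequences
-- ===== SOURCE B (Python) =====
-- import string
--
-- translator = str.maketrans('', '', string.punctuation)
--
-- excluded_pos = ["NP","NNP","NP-TL","NP$"]
--
-- def extract_natural_sequences(tagged_words, sequence_len):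
--     # Pass 1: segment the preprocessed words into maximal runs of valid words.
--     runs = []
--     cur = []
--     for word, tag in tagged_words:
--         w = word.replace("-", "").replace("''", "").lower().translate(translator)
--         if w.isalpha() and w != '' and tag not in excluded_pos:
--             cur.append(w)
--         else:
--             if cur:
--                 runs.append(cur)
--                 cur = []
--     if cur:
--         runs.append(cur)
--     # Pass 2: cut each run into consecutive non-overlapping blocks of sequence_len.
--     if sequence_len <= 0:
--         return []
--     result = []
--     for run in runs:
--         while len(run) >= sequence_len:
--             result.append(run[:sequence_len])
--             run = run[sequence_len:]
--     return result
-- ===== Notes on version B (the rewrite author's own statement) =====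
-- stated objective: alternative
-- what changed: A interleaves preprocessing, a reset counter and online emission in one loop over an ever-growing word_list with negative slicing; B decomposes the task into two passes: segment the preprocessed words into maximal runs of valid words, then cut each run into consecutive non-overlapping sequence_len blocks.
import Mathlib
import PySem

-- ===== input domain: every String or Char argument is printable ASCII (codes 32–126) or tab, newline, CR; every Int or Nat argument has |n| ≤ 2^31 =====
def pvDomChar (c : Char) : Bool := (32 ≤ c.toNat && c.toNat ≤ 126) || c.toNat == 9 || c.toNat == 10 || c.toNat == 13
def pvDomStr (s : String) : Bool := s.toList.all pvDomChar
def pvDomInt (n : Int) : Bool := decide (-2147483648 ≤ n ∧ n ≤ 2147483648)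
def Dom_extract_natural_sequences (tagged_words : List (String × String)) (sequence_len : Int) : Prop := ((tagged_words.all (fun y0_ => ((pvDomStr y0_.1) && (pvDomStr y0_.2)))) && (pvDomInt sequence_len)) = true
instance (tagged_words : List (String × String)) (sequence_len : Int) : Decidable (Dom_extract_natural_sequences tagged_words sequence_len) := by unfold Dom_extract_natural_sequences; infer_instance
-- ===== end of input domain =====

-- B re-decomposes A's counter-reset loop into two passes (segment into maximal valid runs, then chunk
-- each run into sequence_len blocks); same return value, objective: alternative decomposition.

-- ===== shared module context (identical lines in both Python sources) =====
-- string.punctuation, as a char list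
def pvPunct : List Char :=
  ['!', '"', '#', '$', '%', '&', '\'', '(', ')', '*', '+', ',', '-', '.', '/', ':', ';',
   '<', '=', '>', '?', '@', '[', '\\', ']', '^', '_', '`', '{', '|', '}', '~']

def pvExcludedPos : List String := ["NP", "NNP", "NP-TL", "NP$"]

-- w = word.replace("-","").replace("''","").lower().translate(translator);
-- translator is a deletion-only table for string.punctuation, so .translate(translator) is exactly
-- "remove every punctuation character" (ported by hand as a filter; exact for this table).
def pvPrep (word : String) : String :=
  String.ofList (((PySem.Str.lower (PySem.Str.replace (PySem.Str.replace word "-" "") "''" "")).toList).filter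
    (fun c => !pvPunct.contains c))

-- the test `w.isalpha() and w != '' and not (tag in excluded_pos)` (same line in A and B)
def pvCondKeep (w : String) (tag : String) : Bool :=
  PySem.Str.strIsalpha w && !(w == "") && !(pvExcludedPos.contains tag)

-- ===== PORT A =====
-- loop body of A: state = (natural_sequences, word_list, counter)
def pvStepA (sequence_len : Int) (st : List (List String) × List String × Int)
    (wt : String × String) : List (List String) × List String × Int :=
  let w := pvPrep wt.1
  if pvCondKeep w wt.2 then
    let wl := st.2.1 ++ [w]
    let c := st.2.2 + 1
    if c == sequence_len then
      -- natural_sequences.append(word_list[-sequence_len:]); counter = 0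
      (st.1 ++ [PySem.List.slice wl (some (-sequence_len)) none], wl, 0)
    else (st.1, wl, c)
  else (st.1, st.2.1, 0)

def extract_natural_sequences (tagged_words : List (String × String)) (sequence_len : Int) :
    List (List String) :=
  (tagged_words.foldl (pvStepA sequence_len) ([], [], 0)).1

-- ===== PORT B =====
-- pass-1 loop body of B: state = (runs, cur)
def pvStepSeg (st : List (List String) × List String) (wt : String × String) :
    List (List String) × List String :=
  let w := pvPrep wt.1
  if pvCondKeep w wt.2 then (st.1, st.2 ++ [w])
  else if st.2 ≠ [] then (st.1 ++ [st.2], []) else st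

-- B's inner `while len(run) >= sequence_len` chunking loop (run[:n] = take n, run[n:] = drop n for
-- the nonnegative n it is called with; the `1 ≤ n` conjunct only makes the recursion total — the
-- caller guarantees it).
def pvChunks (n : Nat) (run : List String) : List (List String) :=
  if 1 ≤ n ∧ n ≤ run.length then
    run.take n :: pvChunks n (run.drop n)
  else []
  termination_by run.length
  decreasing_by simp; omega

def extract_natural_sequences_alt (tagged_words : List (String × String)) (sequence_len : Int) :
    List (List String) :=
  let st := tagged_words.foldl pvStepSeg ([], [])
  let runs := if st.2 ≠ [] then st.1 ++ [st.2] else st.1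
  if sequence_len ≤ 0 then []
  else runs.foldl (fun out run => out ++ pvChunks sequence_len.toNat run) []

-- ===== PRECONDITION & SPEC =====
def Spec_extract_natural_sequences (tagged_words : List (String × String)) (sequence_len : Int) (out : List (List String)) : Prop := out = extract_natural_sequences_alt tagged_words sequence_len
instance (tagged_words : List (String × String)) (sequence_len : Int) (out : List (List String)) : Decidable (Spec_extract_natural_sequences tagged_words sequence_len out) := by unfold Spec_extract_natural_sequences; infer_instance

-- ===== CLAIM (what is proved, stated in full; the proofs are below) =====
def Claim_equal_extract_natural_sequences : Prop := ∀ (tagged_words : List (String × String)) (sequence_len : Int), Dom_extract_natural_sequences tagged_words sequence_len → Spec_extract_natural_sequences tagged_words sequence_len (extract_natural_sequences tagged_words sequence_len)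

-- ===== LEMMAS AND PROOFS =====

-- proof-only helpers
def pvValid (wt : String × String) : Bool := pvCondKeep (pvPrep wt.1) wt.2

-- recursive description of B's segmentation: the runs still to be produced, given the current run p
def pvRunsFrom (p : List String) : List (String × String) → List (List String)
  | [] => if p = [] then [] else [p]
  | wt :: ws =>
      if pvValid wt then pvRunsFrom (p ++ [pvPrep wt.1]) ws
      else if p = [] then pvRunsFrom [] ws else p :: pvRunsFrom [] ws

lemma pvChunks_short {n : Nat} {run : List String} (h : run.length < n) :
    pvChunks n run = [] := by
  rw [pvChunks, if_neg]; omega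

lemma pvChunks_single {n : Nat} (hn : 1 ≤ n) {d : List String} (hd : d.length = n) :
    pvChunks n d = [d] := by
  rw [pvChunks, if_pos ⟨hn, by omega⟩]
  rw [← hd, List.take_length, List.drop_length, pvChunks_short (by simp; omega)]

lemma pvChunks_cons {n : Nat} (hn : 1 ≤ n) {d : List String} (hd : d.length = n)
    (x : List String) : pvChunks n (d ++ x) = d :: pvChunks n x := by
  rw [pvChunks, if_pos (by refine ⟨hn, ?_⟩; simp [hd])]
  subst hd
  rw [List.take_left, List.drop_left]

-- moving a full block out of the head run
lemma pvPull {n : Nat} (hn : 1 ≤ n) :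
    ∀ (ws : List (String × String)) (d p : List String), d.length = n →
    (pvRunsFrom (d ++ p) ws).flatMap (pvChunks n) = d :: (pvRunsFrom p ws).flatMap (pvChunks n) := by
  intro ws
  induction ws with
  | nil =>
      intro d p hd
      simp only [pvRunsFrom]
      have hne : d ++ p ≠ [] := by
        intro h; have := congrArg List.length h; simp [hd] at this; omega
      rw [if_neg hne]
      by_cases hp : p = []
      · subst hp; simp [pvChunks_single hn hd]
      · simp [hp, pvChunks_cons hn hd]
  | cons wt ws ih =>
      intro d p hd
      simp only [pvRunsFrom]
      by_cases hv : pvValid wt = true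
      · simp only [hv, if_true]
        rw [List.append_assoc]
        exact ih d (p ++ [pvPrep wt.1]) hd
      · simp only [hv, if_false, Bool.false_eq_true]
      -- invalid word: the current run (if any) closes
        have hne : d ++ p ≠ [] := by
          intro h; have := congrArg List.length h; simp [hd] at this; omega
        rw [if_neg hne]
        by_cases hp : p = []
        · subst hp
          simp [pvChunks_single hn hd]
        · rw [if_neg hp]
          simp [pvChunks_cons hn hd]

-- n ≤ 0: A never emits (counter stays ≥ 0, so counter+1 ≥ 1 > n)
lemma pvLoopA_nonpos {n : Int} (hn : n ≤ 0) :
    ∀ (ws : List (String × String)) (acc : List (List String)) (wl : List String) (c : Int),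
    0 ≤ c → (ws.foldl (pvStepA n) (acc, wl, c)).1 = acc := by
  intro ws
  induction ws with
  | nil => intro acc wl c _; rfl
  | cons wt ws ih =>
      intro acc wl c hc
      simp only [List.foldl_cons, pvStepA]
      by_cases hv : pvCondKeep (pvPrep wt.1) wt.2 = true
      · simp only [hv, if_true]
        have : (c + 1 == n) = false := by simp; omega
        simp only [this, Bool.false_eq_true, if_false]
        exact ih acc (wl ++ [pvPrep wt.1]) (c + 1) (by omega)
      · simp only [hv, Bool.false_eq_true, if_false]
        exact ih acc wl 0 (by omega)

-- n ≥ 1: A's loop emits exactly the chunks of the runs; p = the valid words since the last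
-- emission/reset (the counter's worth), r = everything appended to word_list before them
lemma pvLoopA {n : Int} {N : Nat} (hn : n = (N : Int)) (hN : 1 ≤ N) :
    ∀ (ws : List (String × String)) (acc : List (List String)) (r p : List String),
    p.length < N →
    (ws.foldl (pvStepA n) (acc, r ++ p, (p.length : Int))).1
      = acc ++ (pvRunsFrom p ws).flatMap (pvChunks N) := by
  intro ws
  induction ws with
  | nil =>
      intro acc r p hp
      simp only [List.foldl_nil, pvRunsFrom]
      by_cases hple : p = []
      · simp [hple]
      · simp [hple, pvChunks_short (n := N) hp]
  | cons wt ws ih =>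
      intro acc r p hp
      simp only [List.foldl_cons, pvStepA, pvRunsFrom]
      by_cases hv : pvCondKeep (pvPrep wt.1) wt.2 = true
      · simp only [hv, if_true]
        have hvalid : pvValid wt = true := hv
        simp only [hvalid, if_true]
        by_cases hemit : p.length + 1 = N
        · -- counter reaches sequence_len: emit word_list[-n:] = p ++ [w], reset counter
          have hbeq : ((p.length : Int) + 1 == n) = true := by
            simp [hn]; omega
          simp only [hbeq, if_true]
          have hslice : PySem.List.slice (r ++ p ++ [pvPrep wt.1]) (some (-n)) none
              = p ++ [pvPrep wt.1] := by
            rw [hn, PySem.List.slice_from_neg_natCast _ N (by omega)]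
            have hlen : (r ++ p ++ [pvPrep wt.1]).length - N = r.length := by
              simp; omega
            rw [hlen, List.append_assoc, List.drop_left]
          rw [hslice]
          have := ih (acc ++ [p ++ [pvPrep wt.1]]) (r ++ p ++ [pvPrep wt.1]) [] (by simp; omega)
          simp only [List.append_nil, List.length_nil, Nat.cast_zero] at this
          rw [this]
          have hd : (p ++ [pvPrep wt.1]).length = N := by simp; omega
          have hpull := pvPull hN ws (p ++ [pvPrep wt.1]) [] hd
          simp only [List.append_nil] at hpull
          rw [hpull]
          simp [List.append_assoc]
        · -- counter below sequence_len: keep accumulating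
          have hbeq : ((p.length : Int) + 1 == n) = false := by
            simp [hn]; omega
          simp only [hbeq, Bool.false_eq_true, if_false]
          have := ih acc r (p ++ [pvPrep wt.1]) (by simp; omega)
          simp only [List.length_append, List.length_cons, List.length_nil, Nat.cast_add,
            Nat.cast_one, List.append_assoc] at this ⊢
          rw [← this]
          norm_num
      · -- invalid word: counter resets, run closes
        have hvalid : pvValid wt = false := by simpa [pvValid] using hv
        simp only [hv, hvalid, Bool.false_eq_true, if_false]
        have := ih acc (r ++ p) [] (by simp; omega)
        simp only [List.append_nil, List.length_nil, Nat.cast_zero] at this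
        rw [this]
        by_cases hple : p = []
        · simp [hple]
        · rw [if_neg hple]
          simp [pvChunks_short (n := N) hp]

-- B's pass 1 (fold + final flush) computes pvRunsFrom
lemma pvSeg_eq :
    ∀ (ws : List (String × String)) (rs : List (List String)) (cur : List String),
    (if (ws.foldl pvStepSeg (rs, cur)).2 ≠ [] then
        (ws.foldl pvStepSeg (rs, cur)).1 ++ [(ws.foldl pvStepSeg (rs, cur)).2]
      else (ws.foldl pvStepSeg (rs, cur)).1)
    = rs ++ pvRunsFrom cur ws := by
  intro ws
  induction ws with
  | nil =>
      intro rs cur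
      simp only [List.foldl_nil, pvRunsFrom]
      by_cases hc : cur = [] <;> simp [hc]
  | cons wt ws ih =>
      intro rs cur
      simp only [List.foldl_cons, pvStepSeg, pvRunsFrom]
      by_cases hv : pvCondKeep (pvPrep wt.1) wt.2 = true
      · have hvalid : pvValid wt = true := hv
        simp only [hv, hvalid, if_true]
        exact ih rs (cur ++ [pvPrep wt.1])
      · have hvalid : pvValid wt = false := by simpa [pvValid] using hv
        simp only [hv, hvalid, Bool.false_eq_true, if_false]
        by_cases hc : cur = []
        · simp only [hc, ne_eq, not_true_eq_false, if_false, if_true]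
          simpa using ih rs []
        · simp only [ne_eq, hc, not_false_eq_true, if_true]
          rw [ih (rs ++ [cur]) []]
          simp

-- ===== VERDICT (by name: the statement is the Claim_ definition above) =====
theorem extract_natural_sequences_spec : Claim_equal_extract_natural_sequences := by
  intro tagged_words sequence_len _
  unfold Spec_extract_natural_sequences
  unfold extract_natural_sequences extract_natural_sequences_alt
  by_cases hn : sequence_len ≤ 0
  · simp only [hn, if_true]
    exact pvLoopA_nonpos hn tagged_words [] [] 0 (by omega)
  · have hpos : 0 < sequence_len := by omega
    have hcast : sequence_len = (sequence_len.toNat : Int) := by omega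
    have hN : 1 ≤ sequence_len.toNat := by omega
    simp only [hn, if_false]
    have hA := pvLoopA hcast hN tagged_words [] [] [] (by simp; omega)
    simp only [List.append_nil, List.length_nil, Nat.cast_zero, List.nil_append] at hA
    rw [hA, pvSeg_eq tagged_words [] []]
    rw [PySem.List.foldl_append_eq_flatMap]
    simp
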